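-- pv_equiv track=rewrite | github.com/zeninpalm/AIND-Isolation | game_agent.py | assign_weight_to_move
-- ===== SOURCE A (Python) =====
-- def assign_weight_to_move(move):
--     base_score = 6
--     base_dist = 3
--
--     while base_dist >= 0:
--         if abs(move[0] - 3) >= base_dist and abs(move[1] - 3) >= base_dist:
--             return base_score
--         elif abs(move[0] - 3) >= base_dist or abs(move[1] - 3) >= base_dist:
--             return base_score - 1
--
--         base_score -= 2
--         base_dist -= 1
-- ===== SOURCE B (Python) =====
-- def assign_weight_to_move(move):
--     dx = abs(move[0] - 3)
--     dy = abs(move[1] - 3)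
--     hi = max(dx, dy)
--     lo = min(dx, dy)
--     d = min(hi, 3)
--     return 2 * d if lo >= d else 2 * d - 1
-- ===== Notes on version B (the rewrite author's own statement) =====
-- stated objective: simpler
-- what changed: Replaces the descending while-loop threshold search with a direct closed-form computation: d = min(max(dx,dy),3) and return 2*d or 2*d-1 depending on min(dx,dy) >= d.
import Mathlib
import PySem

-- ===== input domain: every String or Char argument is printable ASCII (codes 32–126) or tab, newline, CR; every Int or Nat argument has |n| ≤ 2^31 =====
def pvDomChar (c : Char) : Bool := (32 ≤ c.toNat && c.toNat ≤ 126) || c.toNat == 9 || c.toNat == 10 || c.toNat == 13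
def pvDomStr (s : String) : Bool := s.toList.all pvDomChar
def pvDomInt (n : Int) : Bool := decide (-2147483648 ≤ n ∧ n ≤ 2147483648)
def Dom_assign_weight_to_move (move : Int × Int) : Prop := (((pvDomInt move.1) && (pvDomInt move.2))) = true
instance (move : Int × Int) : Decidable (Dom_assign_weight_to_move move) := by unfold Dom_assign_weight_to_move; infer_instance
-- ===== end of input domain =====

-- B replaces A's descending while-loop threshold search with a direct closed-form computation (objective: simpler).

-- ===== PORT A =====
-- literal port of A's while-loop: state (base_score, base_dist), one recursive step per iteration;
-- fuel 4 covers the at most 4 iterations (the loop always returns by base_dist = 0, so fuel is never exhausted).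
def awLoopA (move : Int × Int) (base_score base_dist : Int) : Nat → Int
  | 0 => 0  -- unreachable: the loop always returns within 4 iterations
  | n + 1 =>
    if base_dist ≥ 0 then
      if ((move.1 - 3).natAbs : Int) ≥ base_dist ∧ ((move.2 - 3).natAbs : Int) ≥ base_dist then base_score
      else if ((move.1 - 3).natAbs : Int) ≥ base_dist ∨ ((move.2 - 3).natAbs : Int) ≥ base_dist then base_score - 1
      else awLoopA move (base_score - 2) (base_dist - 1) n
    else 0  -- loop exits without return (Python None; unreachable)

def assign_weight_to_move (move : Int × Int) : Int :=
  awLoopA move 6 3 4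

-- ===== PORT B =====
def assign_weight_to_move_alt (move : Int × Int) : Int :=
  let dx : Int := (move.1 - 3).natAbs
  let dy : Int := (move.2 - 3).natAbs
  let hi := max dx dy
  let lo := min dx dy
  let d := min hi 3
  if lo ≥ d then 2 * d else 2 * d - 1

-- ===== PRECONDITION & SPEC =====
def Spec_assign_weight_to_move (move : Int × Int) (out : Int) : Prop := out = assign_weight_to_move_alt move
instance (move : Int × Int) (out : Int) : Decidable (Spec_assign_weight_to_move move out) := by unfold Spec_assign_weight_to_move; infer_instance

-- ===== CLAIM (what is proved, stated in full; the proofs are below) =====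
def Claim_equal_assign_weight_to_move : Prop := ∀ (move : Int × Int), Dom_assign_weight_to_move move → Spec_assign_weight_to_move move (assign_weight_to_move move)

-- ===== LEMMAS AND PROOFS =====
lemma awLoopA_succ (move : Int × Int) (s d : Int) (n : Nat) :
    awLoopA move s d (n + 1) =
      (if d ≥ 0 then
        if ((move.1 - 3).natAbs : Int) ≥ d ∧ ((move.2 - 3).natAbs : Int) ≥ d then s
        else if ((move.1 - 3).natAbs : Int) ≥ d ∨ ((move.2 - 3).natAbs : Int) ≥ d then s - 1
        else awLoopA move (s - 2) (d - 1) n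
      else 0) := rfl

-- ===== VERDICT (by name: the statement is the Claim_ definition above) =====
set_option maxHeartbeats 1000000 in
theorem assign_weight_to_move_spec : Claim_equal_assign_weight_to_move := by
  intro move _
  show awLoopA move 6 3 (((0 + 1) + 1 + 1) + 1) =
    (if min (max ((move.1 - 3).natAbs : Int) ((move.2 - 3).natAbs : Int)) 3 ≤
        min ((move.1 - 3).natAbs : Int) ((move.2 - 3).natAbs : Int) then
      2 * min (max ((move.1 - 3).natAbs : Int) ((move.2 - 3).natAbs : Int)) 3
    else 2 * min (max ((move.1 - 3).natAbs : Int) ((move.2 - 3).natAbs : Int)) 3 - 1)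
  rw [awLoopA_succ, awLoopA_succ, awLoopA_succ, awLoopA_succ]
  set a : Int := ((move.1 - 3).natAbs : Int) with h1
  set b : Int := ((move.2 - 3).natAbs : Int) with h2
  have ha : (0:Int) ≤ a := h1 ▸ Int.natCast_nonneg _
  have hb : (0:Int) ≤ b := h2 ▸ Int.natCast_nonneg _
  clear h1 h2
  rcases le_total a b with h | h <;>
    simp only [max_def, min_def, h, if_pos, ge_iff_le] <;> norm_num <;> split_ifs <;> omega
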